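-- pv_equiv track=rewrite | github.com/bymars/topcoder | srm680/BearPair.py | bigDistance
-- ===== SOURCE A (Python) =====
-- def bigDistance(s):
--     l = len(s)
--     max = -1
--     for i in range(l):
--         if s[i] != s[l - 1]:
--             max = l - i - 1  if max < l - i - 1 else max
--             break
--     for i in range(l)[::-1]:
--         if s[i] != s[0]:
--             max = i if max < i else max
--     return max
-- ===== SOURCE B (Python) =====
-- def bigDistance(s):
--     result = -1
--     n = len(s)
--     for i in range(n):
--         for j in range(i + 1, n):
--             if s[i] != s[j] and j - i > result:
--                 result = j - i
--     return result
-- ===== Notes on version B (the rewrite author's own statement) =====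
-- stated objective: alternative
-- what changed: B computes the answer by the direct definition, a nested pairwise loop maximising j-i over all index pairs with differing characters, instead of A's two linear endpoint scans.
import Mathlib
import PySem

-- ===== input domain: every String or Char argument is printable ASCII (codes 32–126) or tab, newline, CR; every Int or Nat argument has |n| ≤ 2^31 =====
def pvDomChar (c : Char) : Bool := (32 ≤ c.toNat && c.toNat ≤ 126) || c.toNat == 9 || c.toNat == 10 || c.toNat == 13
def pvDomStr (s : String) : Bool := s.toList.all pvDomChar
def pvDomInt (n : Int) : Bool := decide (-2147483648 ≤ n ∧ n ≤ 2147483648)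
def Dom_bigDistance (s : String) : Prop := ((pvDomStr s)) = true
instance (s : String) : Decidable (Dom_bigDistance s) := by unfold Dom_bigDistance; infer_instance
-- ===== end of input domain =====

-- B replaces A's two endpoint scans by the direct nested pairwise maximisation (alternative algorithm, same results).

-- ===== PORT A =====
-- first loop: 'for i in range(l): if s[i] != s[l-1]: max = …; break'
def pvLoop1 (cs : List Char) (l : Int) : List Int → Int → Int
  | [], m => m
  | i :: rest, m =>
    if PySem.List.pyGet? cs i ≠ PySem.List.pyGet? cs (l - 1) then
      if m < l - i - 1 then l - i - 1 else m
    else pvLoop1 cs l rest m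

def bigDistance (s : String) : Int :=
  let cs := s.toList
  let l : Int := cs.length
  let m := pvLoop1 cs l (PySem.List.pyRange 0 l 1) (-1)
  -- 'range(l)[::-1]' is the reversed range (PySem.List.slice?_none_none_neg_one)
  ((PySem.List.pyRange 0 l 1).reverse).foldl
    (fun m i =>
      if PySem.List.pyGet? cs i ≠ PySem.List.pyGet? cs 0 then
        if m < i then i else m
      else m) m

-- ===== PORT B =====
def bigDistance_alt (s : String) : Int :=
  let cs := s.toList
  let n : Int := cs.length
  (PySem.List.pyRange 0 n 1).foldl
    (fun r i =>
      (PySem.List.pyRange (i + 1) n 1).foldl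
        (fun r j =>
          if PySem.List.pyGet? cs i ≠ PySem.List.pyGet? cs j ∧ j - i > r then j - i else r)
        r)
    (-1)

-- ===== PRECONDITION & SPEC =====
def Spec_bigDistance (s : String) (out : Int) : Prop := out = bigDistance_alt s
instance (s : String) (out : Int) : Decidable (Spec_bigDistance s out) := by unfold Spec_bigDistance; infer_instance

-- ===== CLAIM (what is proved, stated in full; the proofs are below) =====
def Claim_equal_bigDistance : Prop := ∀ (s : String), Dom_bigDistance s → Spec_bigDistance s (bigDistance s)

-- ===== LEMMAS AND PROOFS =====

/-- A pair of indices witnessing a distance `j - i` between differing characters. -/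
def pvGood (cs : List Char) (i j : Int) : Prop :=
  0 ≤ i ∧ i < j ∧ j < (cs.length : Int) ∧ PySem.List.pyGet? cs i ≠ PySem.List.pyGet? cs j

/-- r bounds every differing-pair distance. -/
def pvUB (cs : List Char) (r : Int) : Prop := ∀ i j, pvGood cs i j → j - i ≤ r

/-- r is -1 or an attained differing-pair distance. -/
def pvAch (cs : List Char) (r : Int) : Prop :=
  r = -1 ∨ ∃ i j, pvGood cs i j ∧ r = j - i

theorem pvUniq {cs : List Char} {r1 r2 : Int}
    (h1u : pvUB cs r1) (h1a : pvAch cs r1) (h2u : pvUB cs r2) (h2a : pvAch cs r2) :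
    r1 = r2 := by
  rcases h1a with h1 | ⟨i, j, hg, he⟩ <;> rcases h2a with h2 | ⟨i', j', hg', he'⟩
  · omega
  · have := h1u i' j' hg'; have := hg'.2.1; omega
  · have := h2u i j hg; have := hg.2.1; omega
  · have := h1u i' j' hg'; have := h2u i j hg; omega

-- ---- properties of A's first loop ----

theorem pvLoop1_ub_aux (cs : List Char) (l t : Int)
    (ht : t < l) (hq : PySem.List.pyGet? cs t ≠ PySem.List.pyGet? cs (l - 1)) :
    ∀ (n : Nat) (a m : Int), (l - a).toNat ≤ n → a ≤ t →
      l - 1 - t ≤ pvLoop1 cs l (PySem.List.pyRange a l 1) m := by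
  intro n
  induction n with
  | zero => intro a m hn ha; omega
  | succ n ih =>
    intro a m hn ha
    rw [PySem.List.pyRange_one_cons (by omega)]
    simp only [pvLoop1]
    split
    · split <;> omega
    · rename_i hne
      by_cases hat : a = t
      · exact absurd (hat ▸ hq) (by simpa using hne)
      · exact ih (a + 1) m (by omega) (by omega)

theorem pvLoop1_ub (cs : List Char) (l : Int) (m t : Int)
    (a : Int) (ha : a ≤ t) (ht : t < l)
    (hq : PySem.List.pyGet? cs t ≠ PySem.List.pyGet? cs (l - 1)) :
    l - 1 - t ≤ pvLoop1 cs l (PySem.List.pyRange a l 1) m :=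
  pvLoop1_ub_aux cs l t ht hq (l - a).toNat a m (le_refl _) ha

theorem pvLoop1_ach (cs : List Char) (l : Int) (L : List Int) (m : Int) :
    pvLoop1 cs l L m = m ∨
      ∃ t ∈ L, PySem.List.pyGet? cs t ≠ PySem.List.pyGet? cs (l - 1) ∧
        pvLoop1 cs l L m = l - 1 - t := by
  induction L generalizing m with
  | nil => simp [pvLoop1]
  | cons a rest ih =>
    simp only [pvLoop1]
    split
    · rename_i hq
      split
      · exact Or.inr ⟨a, by simp, by simpa using hq, by omega⟩
      · exact Or.inl rfl
    · rcases ih m with h | ⟨t, htm, hq, he⟩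
      · exact Or.inl h
      · exact Or.inr ⟨t, by simp [htm], hq, he⟩

-- ---- properties of A's second loop ----

theorem pvLoop2_ge (cs : List Char) (L : List Int) (m : Int) :
    m ≤ L.foldl (fun m i =>
        if PySem.List.pyGet? cs i ≠ PySem.List.pyGet? cs 0 then
          if m < i then i else m
        else m) m := by
  induction L generalizing m with
  | nil => simp
  | cons a rest ih =>
    simp only [List.foldl_cons]
    refine le_trans ?_ (ih _)
    split
    · split <;> omega
    · omega

theorem pvLoop2_ub (cs : List Char) (L : List Int) (m t : Int)
    (htm : t ∈ L) (hq : PySem.List.pyGet? cs t ≠ PySem.List.pyGet? cs 0) :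
    t ≤ L.foldl (fun m i =>
        if PySem.List.pyGet? cs i ≠ PySem.List.pyGet? cs 0 then
          if m < i then i else m
        else m) m := by
  induction L generalizing m with
  | nil => simp at htm
  | cons a rest ih =>
    simp only [List.foldl_cons]
    rcases List.mem_cons.mp htm with rfl | hmem
    · refine le_trans ?_ (pvLoop2_ge cs rest _)
      simp only [if_pos (by simpa using hq)]
      split <;> omega
    · exact ih _ hmem

theorem pvLoop2_ach (cs : List Char) (L : List Int) (m : Int) :
    (L.foldl (fun m i =>
        if PySem.List.pyGet? cs i ≠ PySem.List.pyGet? cs 0 then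
          if m < i then i else m
        else m) m) = m ∨
      ∃ t ∈ L, PySem.List.pyGet? cs t ≠ PySem.List.pyGet? cs 0 ∧
        (L.foldl (fun m i =>
          if PySem.List.pyGet? cs i ≠ PySem.List.pyGet? cs 0 then
            if m < i then i else m
          else m) m) = t := by
  induction L generalizing m with
  | nil => simp
  | cons a rest ih =>
    simp only [List.foldl_cons]
    have step : (if PySem.List.pyGet? cs a ≠ PySem.List.pyGet? cs 0 then
        if m < a then a else m else m) = m ∨
        ((if PySem.List.pyGet? cs a ≠ PySem.List.pyGet? cs 0 then
          if m < a then a else m else m) = a ∧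
          PySem.List.pyGet? cs a ≠ PySem.List.pyGet? cs 0) := by
      split
      · rename_i hq
        split
        · exact Or.inr ⟨rfl, by simpa using hq⟩
        · exact Or.inl rfl
      · exact Or.inl rfl
    rcases ih (if PySem.List.pyGet? cs a ≠ PySem.List.pyGet? cs 0 then
        if m < a then a else m else m) with h | ⟨t, htm, hq, he⟩
    · rcases step with hs | ⟨hs, hq⟩
      · exact Or.inl (h.trans hs)
      · exact Or.inr ⟨a, by simp, hq, h.trans hs⟩
    · exact Or.inr ⟨t, by simp [htm], hq, he⟩

-- ---- A satisfies pvUB and pvAch ----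

theorem pvA_ub (s : String) : pvUB s.toList (bigDistance s) := by
  intro i j hg
  obtain ⟨hi0, hij, hjl, hne⟩ := hg
  set cs := s.toList with hcs
  set l : Int := (cs.length : Int) with hl
  have hbd : bigDistance s =
      ((PySem.List.pyRange 0 l 1).reverse).foldl
        (fun m i =>
          if PySem.List.pyGet? cs i ≠ PySem.List.pyGet? cs 0 then
            if m < i then i else m
          else m) (pvLoop1 cs l (PySem.List.pyRange 0 l 1) (-1)) := rfl
  rw [hbd]
  by_cases hj0 : PySem.List.pyGet? cs j = PySem.List.pyGet? cs 0
  · -- s[j] = s[0], hence s[i] ≠ s[0]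
    have hi0' : PySem.List.pyGet? cs i ≠ PySem.List.pyGet? cs 0 := by
      rw [← hj0]; exact hne
    by_cases hil : PySem.List.pyGet? cs i = PySem.List.pyGet? cs (l - 1)
    · -- s[i] = s[l-1], so s[0] ≠ s[l-1]: index 0 qualifies in loop 1
      have h0l : PySem.List.pyGet? cs (0 : Int) ≠ PySem.List.pyGet? cs (l - 1) := by
        rw [← hil]; exact fun h => hi0' h.symm
      have h1 := pvLoop1_ub cs l (-1) 0 0 (by omega) (by omega) h0l
      have h2 := pvLoop2_ge cs ((PySem.List.pyRange 0 l 1).reverse)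
        (pvLoop1 cs l (PySem.List.pyRange 0 l 1) (-1))
      omega
    · -- s[i] ≠ s[l-1]: loop 1 reaches a mismatch at index ≤ i
      have h1 := pvLoop1_ub cs l (-1) i 0 hi0 (by omega) hil
      have h2 := pvLoop2_ge cs ((PySem.List.pyRange 0 l 1).reverse)
        (pvLoop1 cs l (PySem.List.pyRange 0 l 1) (-1))
      omega
  · -- s[j] ≠ s[0]: loop 2 sees index j
    have hjm : j ∈ (PySem.List.pyRange 0 l 1).reverse := by
      rw [List.mem_reverse, PySem.List.mem_pyRange_one]; omega
    have h2 := pvLoop2_ub cs ((PySem.List.pyRange 0 l 1).reverse)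
      (pvLoop1 cs l (PySem.List.pyRange 0 l 1) (-1)) j hjm hj0
    omega

theorem pvA_ach (s : String) : pvAch s.toList (bigDistance s) := by
  set cs := s.toList with hcs
  set l : Int := (cs.length : Int) with hl
  have hbd : bigDistance s =
      ((PySem.List.pyRange 0 l 1).reverse).foldl
        (fun m i =>
          if PySem.List.pyGet? cs i ≠ PySem.List.pyGet? cs 0 then
            if m < i then i else m
          else m) (pvLoop1 cs l (PySem.List.pyRange 0 l 1) (-1)) := rfl
  rw [hbd]
  rcases pvLoop2_ach cs ((PySem.List.pyRange 0 l 1).reverse)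
      (pvLoop1 cs l (PySem.List.pyRange 0 l 1) (-1)) with h2 | ⟨t, htm, hq, he⟩
  · rw [h2]
    rcases pvLoop1_ach cs l (PySem.List.pyRange 0 l 1) (-1) with h1 | ⟨t, htm, hq, he⟩
    · exact Or.inl h1
    · rw [PySem.List.mem_pyRange_one] at htm
      have htl : t ≠ l - 1 := fun h => hq (h ▸ rfl)
      exact Or.inr ⟨t, l - 1, ⟨by omega, by omega, by omega, hq⟩, by omega⟩
  · rw [List.mem_reverse, PySem.List.mem_pyRange_one] at htm
    have ht0 : t ≠ 0 := fun h => hq (h ▸ rfl)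
    exact Or.inr ⟨0, t, ⟨le_refl 0, by omega, by omega, fun h => hq h.symm⟩, by omega⟩

-- ---- properties of B's nested loops ----

theorem pvInner_ge (cs : List Char) (i : Int) (L : List Int) (r : Int) :
    r ≤ L.foldl (fun r j =>
        if PySem.List.pyGet? cs i ≠ PySem.List.pyGet? cs j ∧ j - i > r then j - i else r) r := by
  induction L generalizing r with
  | nil => simp
  | cons a rest ih =>
    simp only [List.foldl_cons]
    refine le_trans ?_ (ih _)
    split <;> omega

theorem pvInner_ub (cs : List Char) (i : Int) (L : List Int) (r j : Int)
    (hjm : j ∈ L) (hq : PySem.List.pyGet? cs i ≠ PySem.List.pyGet? cs j) :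
    j - i ≤ L.foldl (fun r j =>
        if PySem.List.pyGet? cs i ≠ PySem.List.pyGet? cs j ∧ j - i > r then j - i else r) r := by
  induction L generalizing r with
  | nil => simp at hjm
  | cons a rest ih =>
    simp only [List.foldl_cons]
    rcases List.mem_cons.mp hjm with rfl | hmem
    · refine le_trans ?_ (pvInner_ge cs i rest _)
      split
      · omega
      · rename_i h
        rw [Classical.not_and_iff_not_or_not] at h
        rcases h with h | h
        · exact absurd hq (by simpa using h)
        · omega
    · exact ih _ hmem

theorem pvInner_ach (cs : List Char) (i : Int) (L : List Int) (r : Int) :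
    (L.foldl (fun r j =>
        if PySem.List.pyGet? cs i ≠ PySem.List.pyGet? cs j ∧ j - i > r then j - i else r) r) = r ∨
      ∃ j ∈ L, PySem.List.pyGet? cs i ≠ PySem.List.pyGet? cs j ∧
        (L.foldl (fun r j =>
          if PySem.List.pyGet? cs i ≠ PySem.List.pyGet? cs j ∧ j - i > r then j - i else r) r) = j - i := by
  induction L generalizing r with
  | nil => simp
  | cons a rest ih =>
    simp only [List.foldl_cons]
    have step : (if PySem.List.pyGet? cs i ≠ PySem.List.pyGet? cs a ∧ a - i > r then a - i else r) = r ∨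
        ((if PySem.List.pyGet? cs i ≠ PySem.List.pyGet? cs a ∧ a - i > r then a - i else r) = a - i ∧
          PySem.List.pyGet? cs i ≠ PySem.List.pyGet? cs a) := by
      split
      · rename_i h; exact Or.inr ⟨rfl, h.1⟩
      · exact Or.inl rfl
    rcases ih (if PySem.List.pyGet? cs i ≠ PySem.List.pyGet? cs a ∧ a - i > r then a - i else r)
        with h | ⟨j, hjm, hq, he⟩
    · rcases step with hs | ⟨hs, hq⟩
      · exact Or.inl (h.trans hs)
      · exact Or.inr ⟨a, by simp, hq, h.trans hs⟩
    · exact Or.inr ⟨j, by simp [hjm], hq, he⟩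

theorem pvOuter_ge (cs : List Char) (l : Int) (L : List Int) (r : Int) :
    r ≤ L.foldl (fun r i =>
        (PySem.List.pyRange (i + 1) l 1).foldl
          (fun r j =>
            if PySem.List.pyGet? cs i ≠ PySem.List.pyGet? cs j ∧ j - i > r then j - i else r) r) r := by
  induction L generalizing r with
  | nil => simp
  | cons a rest ih =>
    simp only [List.foldl_cons]
    exact le_trans (pvInner_ge cs a _ r) (ih _)

theorem pvOuter_ub (cs : List Char) (l : Int) (L : List Int) (r i j : Int)
    (him : i ∈ L) (hij : i < j) (hjl : j < l)
    (hq : PySem.List.pyGet? cs i ≠ PySem.List.pyGet? cs j) :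
    j - i ≤ L.foldl (fun r i =>
        (PySem.List.pyRange (i + 1) l 1).foldl
          (fun r j =>
            if PySem.List.pyGet? cs i ≠ PySem.List.pyGet? cs j ∧ j - i > r then j - i else r) r) r := by
  induction L generalizing r with
  | nil => simp at him
  | cons a rest ih =>
    simp only [List.foldl_cons]
    rcases List.mem_cons.mp him with rfl | hmem
    · refine le_trans ?_ (pvOuter_ge cs l rest _)
      exact pvInner_ub cs i _ r j (by rw [PySem.List.mem_pyRange_one]; omega) hq
    · exact ih _ hmem

theorem pvOuter_ach (cs : List Char) (l : Int) (L : List Int) (r : Int) :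
    (L.foldl (fun r i =>
        (PySem.List.pyRange (i + 1) l 1).foldl
          (fun r j =>
            if PySem.List.pyGet? cs i ≠ PySem.List.pyGet? cs j ∧ j - i > r then j - i else r) r) r) = r ∨
      ∃ i ∈ L, ∃ j, i < j ∧ j < l ∧ PySem.List.pyGet? cs i ≠ PySem.List.pyGet? cs j ∧
        (L.foldl (fun r i =>
          (PySem.List.pyRange (i + 1) l 1).foldl
            (fun r j =>
              if PySem.List.pyGet? cs i ≠ PySem.List.pyGet? cs j ∧ j - i > r then j - i else r) r) r) = j - i := by
  induction L generalizing r with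
  | nil => simp
  | cons a rest ih =>
    simp only [List.foldl_cons]
    rcases ih ((PySem.List.pyRange (a + 1) l 1).foldl
        (fun r j =>
          if PySem.List.pyGet? cs a ≠ PySem.List.pyGet? cs j ∧ j - a > r then j - a else r) r)
        with h | ⟨i, him, j, hij, hjl, hq, he⟩
    · rcases pvInner_ach cs a (PySem.List.pyRange (a + 1) l 1) r with hs | ⟨j, hjm, hq, hs⟩
      · exact Or.inl (h.trans hs)
      · rw [PySem.List.mem_pyRange_one] at hjm
        exact Or.inr ⟨a, by simp, j, by omega, by omega, hq, h.trans hs⟩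
    · exact Or.inr ⟨i, by simp [him], j, hij, hjl, hq, he⟩

theorem pvB_ub (s : String) : pvUB s.toList (bigDistance_alt s) := by
  intro i j hg
  obtain ⟨hi0, hij, hjl, hne⟩ := hg
  exact pvOuter_ub s.toList _ _ (-1) i j
    (by rw [PySem.List.mem_pyRange_one]; omega) hij hjl hne

theorem pvB_ach (s : String) : pvAch s.toList (bigDistance_alt s) := by
  rcases pvOuter_ach s.toList (s.toList.length : Int) (PySem.List.pyRange 0 (s.toList.length : Int) 1) (-1)
      with h | ⟨i, him, j, hij, hjl, hq, he⟩
  · exact Or.inl h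
  · rw [PySem.List.mem_pyRange_one] at him
    exact Or.inr ⟨i, j, ⟨by omega, hij, hjl, hq⟩, he⟩

-- ===== VERDICT (by name: the statement is the Claim_ definition above) =====
theorem bigDistance_spec : Claim_equal_bigDistance := by
  intro s _
  exact pvUniq (pvA_ub s) (pvA_ach s) (pvB_ub s) (pvB_ach s)
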